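-- pv_equiv track=rewrite | github.com/ashuk203/tutorials | IPL/remove_adjacent.py | strip_iter
-- ===== SOURCE A (Python) =====
-- def is_deletable_max(s_arr, i):
--     if i == 0:
--         if len(s_arr) > 1:
--             return (ord(s_arr[i]) - ord(s_arr[i + 1]) == 1)
--         return False
--
--     if i == len(s_arr) - 1:
--         return (ord(s_arr[i]) - ord(s_arr[i - 1]) == 1)
--
--     left_diff = ord(s_arr[i]) - ord(s_arr[i - 1])
--     right_diff = ord(s_arr[i]) - ord(s_arr[i + 1])
--     left_is_previous = left_diff == 1
--     right_is_previous = right_diff == 1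
--
--     return (left_is_previous or right_is_previous) and (left_diff >= 0) and (right_diff >= 0)
--
-- def strip_iter(s):
--     len_s = len(s)
--     s_arr = [s[i] for i in range(len_s)]
--
--     # Greedy remove elements
--     curr_idx = 0
--     while curr_idx < len(s_arr):
--         if is_deletable_max(s_arr, curr_idx):
--             del s_arr[curr_idx]
--             curr_idx = 0
--         else:
--             curr_idx += 1
--
--     return "".join(s_arr)
-- ===== SOURCE B (Python) =====
-- # Stack + reversed-suffix formulation: the scan pointer backs up only one step after a
-- # deletion (an O(1) pop) instead of restarting at 0, giving one amortized-linear pass.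
-- def _deletable(l, c, r):
--     if l is None:
--         return r is not None and ord(c) - ord(r) == 1
--     if r is None:
--         return ord(c) - ord(l) == 1
--     ld = ord(c) - ord(l)
--     rd = ord(c) - ord(r)
--     return (ld == 1 or rd == 1) and ld >= 0 and rd >= 0
--
-- def strip_iter(s):
--     rest = list(s)
--     rest.reverse()          # top (end) of rest = next unprocessed char
--     left = []               # kept chars; top (end) = nearest left neighbour
--     while rest:
--         c = rest[-1]
--         l = left[-1] if left else None
--         r = rest[-2] if len(rest) > 1 else None
--         if _deletable(l, c, r):
--             rest.pop()
--             if left: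
--                 rest.append(left.pop())
--         else:
--             left.append(rest.pop())
--     return ''.join(left)
-- ===== Notes on version B (the rewrite author's own statement) =====
-- stated objective: faster
-- what changed: Replaced the restart-to-0 rescan with one amortized-linear stack pass: the cursor backs up only one position after a deletion (positions further left stay non-deletable), and the O(n) list del becomes O(1) stack pops.
import Mathlib
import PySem

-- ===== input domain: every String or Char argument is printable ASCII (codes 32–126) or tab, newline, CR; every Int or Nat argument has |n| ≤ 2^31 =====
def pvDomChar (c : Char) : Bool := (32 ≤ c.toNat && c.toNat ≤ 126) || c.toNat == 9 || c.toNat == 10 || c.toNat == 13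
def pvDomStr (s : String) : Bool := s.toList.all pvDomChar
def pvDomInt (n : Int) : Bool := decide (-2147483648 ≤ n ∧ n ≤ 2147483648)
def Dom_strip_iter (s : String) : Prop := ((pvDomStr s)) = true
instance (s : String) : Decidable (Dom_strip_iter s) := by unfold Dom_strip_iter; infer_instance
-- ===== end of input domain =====

-- B replaces A's restart-to-0 rescan (with O(n) list deletion) by a single stack pass whose
-- cursor backs up one step after each deletion; same return value, amortized-linear time.

-- ===== PORT A =====
-- Python's curr_idx/i are ints that stay ≥ 0 throughout; they are ported as Nat.
-- s_arr[j] accesses are always in range at the call sites; ported as getD with an unreachable default.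
def is_deletable_max (s_arr : List Char) (i : Nat) : Bool :=
  if i = 0 then
    if 1 < s_arr.length then
      ((s_arr.getD i ' ').toNat : Int) - ((s_arr.getD (i + 1) ' ').toNat : Int) == 1
    else false
  else if i = s_arr.length - 1 then
    ((s_arr.getD i ' ').toNat : Int) - ((s_arr.getD (i - 1) ' ').toNat : Int) == 1
  else
    let left_diff : Int := ((s_arr.getD i ' ').toNat : Int) - ((s_arr.getD (i - 1) ' ').toNat : Int)
    let right_diff : Int := ((s_arr.getD i ' ').toNat : Int) - ((s_arr.getD (i + 1) ' ').toNat : Int)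
    let left_is_previous := left_diff == 1
    let right_is_previous := right_diff == 1
    (left_is_previous || right_is_previous) && left_diff ≥ 0 && right_diff ≥ 0

-- the while-loop of A: delete at curr_idx and restart at 0, else advance
def strip_iter_loop (s_arr : List Char) (curr_idx : Nat) : List Char :=
  if h : curr_idx < s_arr.length then
    if is_deletable_max s_arr curr_idx then
      strip_iter_loop (s_arr.eraseIdx curr_idx) 0
    else
      strip_iter_loop s_arr (curr_idx + 1)
  else s_arr
termination_by (s_arr.length, s_arr.length - curr_idx)
decreasing_by
  · left; have := List.length_eraseIdx_of_lt h; omega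
  · right; omega

def strip_iter (s : String) : String :=
  let len_s := s.length
  let s_arr := (List.range len_s).map (fun i => s.toList.getD i ' ')
  String.mk (strip_iter_loop s_arr 0)

-- ===== PORT B =====
def pv_deletable (l : Option Char) (c : Char) (r : Option Char) : Bool :=
  match l with
  | none =>
    match r with
    | none => false
    | some rc => ((c.toNat : Int) - (rc.toNat : Int)) == 1
  | some lc =>
    match r with
    | none => ((c.toNat : Int) - (lc.toNat : Int)) == 1
    | some rc =>
      let ld : Int := (c.toNat : Int) - (lc.toNat : Int)
      let rd : Int := (c.toNat : Int) - (rc.toNat : Int)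
      (ld == 1 || rd == 1) && ld ≥ 0 && rd ≥ 0

-- Source B's while-loop; Python's end-of-list stack tops are Lean list heads
-- (rest head = next unprocessed char, left head = nearest kept neighbour)
def strip_iter_alt_loop (left : List Char) (rest : List Char) : List Char :=
  match rest with
  | [] => left.reverse
  | c :: rs =>
    if pv_deletable left.head? c rs.head? then
      match left with
      | [] => strip_iter_alt_loop [] rs
      | l :: ls => strip_iter_alt_loop ls (l :: rs)
    else
      strip_iter_alt_loop (c :: left) rs
termination_by 2 * rest.length + left.length
decreasing_by all_goals (simp; try omega)

def strip_iter_alt (s : String) : String :=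
  String.mk (strip_iter_alt_loop [] s.toList)

-- ===== PRECONDITION & SPEC =====
def Spec_strip_iter (s : String) (out : String) : Prop := out = strip_iter_alt s
instance (s : String) (out : String) : Decidable (Spec_strip_iter s out) := by unfold Spec_strip_iter; infer_instance

-- ===== CLAIM (what is proved, stated in full; the proofs are below) =====
def Claim_equal_strip_iter : Prop := ∀ (s : String), Dom_strip_iter s → Spec_strip_iter s (strip_iter s)

-- ===== LEMMAS AND PROOFS =====

-- no position strictly below k is deletable
def NoDelBelow (arr : List Char) (k : Nat) : Prop :=
  ∀ j, j < k → is_deletable_max arr j = false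

-- A's scan may start at any k whose prefix is non-deletable
theorem strip_iter_loop_skip (arr : List Char) (j k : Nat) (hjk : j ≤ k)
    (hnd : NoDelBelow arr k) : strip_iter_loop arr j = strip_iter_loop arr k := by
  obtain ⟨n, hn⟩ : ∃ n, k - j = n := ⟨_, rfl⟩
  induction n generalizing j with
  | zero =>
    have : j = k := by omega
    subst this; rfl
  | succ n ih =>
    have hj : j < k := by omega
    by_cases hlen : j < arr.length
    · rw [strip_iter_loop, dif_pos hlen, hnd j hj]
      simp only [Bool.false_eq_true, if_false]
      exact ih (j + 1) (by omega) (by omega)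
    · rw [strip_iter_loop, dif_neg hlen, strip_iter_loop,
        dif_neg (by omega : ¬ k < arr.length)]

-- deletability at the seam depends only on the three neighbours
theorem is_deletable_seam (P : List Char) (c : Char) (rs : List Char) :
    is_deletable_max (P ++ c :: rs) P.length = pv_deletable P.getLast? c rs.head? := by
  rcases List.eq_nil_or_concat P with rfl | ⟨P', p, rfl⟩
  · cases rs with
    | nil => simp [is_deletable_max, pv_deletable]
    | cons r rs' => simp [is_deletable_max, pv_deletable]
  · cases rs with
    | nil => simp [is_deletable_max, pv_deletable]
    | cons r rs' =>
      have g3 : (P' ++ p :: c :: r :: rs')[P'.length + 1 + 1]?.getD ' ' = r := by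
        rw [List.getElem?_append_right (by omega),
          (by omega : P'.length + 1 + 1 - P'.length = 2)]
        rfl
      simp [is_deletable_max, pv_deletable, g3]

-- deletability strictly inside the prefix ignores the suffix
theorem is_deletable_prefix (P Q Q' : List Char) (j : Nat) (h : j + 1 < P.length) :
    is_deletable_max (P ++ Q) j = is_deletable_max (P ++ Q') j := by
  have g : ∀ (R : List Char) (i : Nat), i ≤ j + 1 → (P ++ R).getD i ' ' = P.getD i ' ' := by
    intro R i hi
    exact List.getD_append _ _ _ _ (by omega)
  rw [is_deletable_max, is_deletable_max]
  rw [g Q j le_self_add, g Q' j le_self_add,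
    g Q (j + 1) le_rfl, g Q' (j + 1) le_rfl,
    g Q (j - 1) (by omega), g Q' (j - 1) (by omega)]
  have hQ : ¬ j = (P ++ Q).length - 1 := by simp; omega
  have hQ' : ¬ j = (P ++ Q').length - 1 := by simp; omega
  by_cases h0 : j = 0
  · rw [if_pos h0, if_pos h0,
      if_pos (by simp; omega : 1 < (P ++ Q).length),
      if_pos (by simp; omega : 1 < (P ++ Q').length)]
  · rw [if_neg h0, if_neg h0, if_neg hQ, if_neg hQ']

-- main simulation: B's stack pass computes A's restart-scan fixpoint
theorem alt_loop_eq (left rest : List Char)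
    (hnd : NoDelBelow (left.reverse ++ rest) left.length) :
    strip_iter_alt_loop left rest = strip_iter_loop (left.reverse ++ rest) left.length := by
  induction left, rest using strip_iter_alt_loop.induct with
  | case1 left =>
    rw [strip_iter_alt_loop, strip_iter_loop]
    simp
  | case2 a b c d =>
    have hseam := is_deletable_seam [] a b
    simp only [List.nil_append, List.length_nil, List.getLast?_nil] at hseam
    rw [strip_iter_alt_loop, if_pos c]
    rw [d (fun j hj => absurd hj (Nat.not_lt_zero j))]
    simp only [List.reverse_nil, List.nil_append, List.length_nil]
    have hD : is_deletable_max (a :: b) 0 = true := by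
      rw [hseam]; exact c
    conv_rhs => rw [strip_iter_loop]
    simp [hD]
  | case3 a b c d e f =>
    have hseam := is_deletable_seam (c :: d).reverse a b
    rw [List.getLast?_reverse] at hseam
    have hD : is_deletable_max ((c :: d).reverse ++ a :: b) (c :: d).length = true := by
      simp only [List.length_reverse] at hseam
      rw [hseam]; exact e
    have hnd' : NoDelBelow ((c :: d).reverse ++ b) d.length := by
      intro j hj
      rw [is_deletable_prefix (c :: d).reverse b (a :: b) j (by simpa using hj)]
      exact hnd j (by simp; omega)
    have hskip := strip_iter_loop_skip ((c :: d).reverse ++ b) 0 d.length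
      (Nat.zero_le _) hnd'
    rw [strip_iter_alt_loop, if_pos e]
    conv_rhs => rw [strip_iter_loop]
    rw [dif_pos (by simp : (c :: d).length < ((c :: d).reverse ++ a :: b).length)]
    rw [if_pos hD]
    rw [List.eraseIdx_append_of_length_le (by simp : (c :: d).reverse.length ≤ (c :: d).length)]
    have : ((c :: d).length - (c :: d).reverse.length) = 0 := by simp
    rw [this, List.eraseIdx_cons_zero, hskip]
    rw [f (by simpa [List.reverse_cons, List.append_assoc] using hnd')]
    simp [List.reverse_cons, List.append_assoc]
  | case4 a b c d e =>
    have hseam := is_deletable_seam a.reverse b c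
    rw [List.getLast?_reverse] at hseam
    have hD : is_deletable_max (a.reverse ++ b :: c) a.length = false := by
      simp only [List.length_reverse] at hseam
      rw [hseam]
      exact Bool.eq_false_iff.mpr d
    have hnd' : NoDelBelow ((b :: a).reverse ++ c) (b :: a).length := by
      intro j hj
      simp only [List.reverse_cons, List.append_assoc, List.cons_append, List.nil_append]
      rcases Nat.lt_or_ge j a.length with h | h
      · exact hnd j h
      · have hj' : j = a.length := by simp at hj; omega
        subst hj'
        exact hD
    conv_lhs => rw [strip_iter_alt_loop.eq_def]
    simp only []
    rw [if_neg d]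
    rw [e hnd']
    conv_rhs => rw [strip_iter_loop]
    rw [dif_pos (by simp : a.length < (a.reverse ++ b :: c).length)]
    rw [if_neg (by rw [hD]; simp)]
    simp [List.reverse_cons, List.append_assoc]

theorem range_map_getD (xs : List Char) :
    (List.range xs.length).map (fun i => xs.getD i ' ') = xs := by
  apply List.ext_getElem
  · simp
  · intro i h1 h2
    simp [List.getD_eq_getElem?_getD, List.getElem?_eq_getElem h2]

-- ===== VERDICT (by name: the statement is the Claim_ definition above) =====
theorem strip_iter_spec : Claim_equal_strip_iter := by
  intro s _
  have h := alt_loop_eq [] s.toList (fun j hj => absurd hj (Nat.not_lt_zero j))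
  simp only [List.reverse_nil, List.nil_append, List.length_nil] at h
  show String.mk (strip_iter_loop ((List.range s.length).map fun i => s.toList.getD i ' ') 0)
      = String.mk (strip_iter_alt_loop [] s.toList)
  rw [← String.length_toList, range_map_getD, h]
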